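-- pv_equiv track=rewrite | github.com/komajun365/competitive_programming | others/typical90/067/main.py | excute
-- ===== SOURCE A (Python) =====
-- def excute(x):
--     res = 0
--     cnt = 0
--     while x > 0:
--         tmp = x % 9
--         if tmp == 8:
--             tmp = 5
--         res += tmp * 8**cnt
--         x //= 9
--         cnt += 1
--     return res
-- ===== SOURCE B (Python) =====
-- def excute(x):
--     if x <= 0:
--         return 0
--     d = x % 9
--     if d == 8:
--         d = 5
--     return d + 8 * excute(x // 9)
-- ===== Notes on version B (the rewrite author's own statement) =====
-- stated objective: simpler
-- what changed: Replaces the iterative loop with explicit res/cnt accumulators and 8**cnt power bookkeeping by a direct recursion on x//9 (Horner form d + 8*rec), eliminating both accumulator variables and the exponentiation.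
import Mathlib
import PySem

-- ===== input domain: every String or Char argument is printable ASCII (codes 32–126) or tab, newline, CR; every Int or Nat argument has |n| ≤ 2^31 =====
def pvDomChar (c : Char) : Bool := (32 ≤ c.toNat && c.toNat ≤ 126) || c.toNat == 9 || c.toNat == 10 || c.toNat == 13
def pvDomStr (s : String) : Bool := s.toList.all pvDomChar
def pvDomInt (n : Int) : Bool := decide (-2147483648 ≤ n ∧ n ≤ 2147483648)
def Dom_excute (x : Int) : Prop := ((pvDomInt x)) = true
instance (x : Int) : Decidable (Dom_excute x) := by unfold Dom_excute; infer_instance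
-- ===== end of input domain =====

-- B replaces A's loop with explicit res/cnt accumulators and 8**cnt powers by a direct Horner recursion on x//9 (simpler).


-- ===== PORT A =====
-- while x > 0: res += (mapped digit) * 8**cnt; x //= 9; cnt += 1
def excuteLoop (x res cnt : Int) : Int :=
  if h : x > 0 then
    let tmp := PySem.Int.mod x 9
    let tmp := if tmp = 8 then 5 else tmp
    excuteLoop (PySem.Int.floordiv x 9) (res + tmp * 8 ^ cnt.toNat) (cnt + 1)
  else res
termination_by x.toNat
decreasing_by
  rw [PySem.Int.floordiv_eq_ediv_of_pos (by norm_num : (0:Int) < 9)]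
  omega

def excute (x : Int) : Int := excuteLoop x 0 0

-- ===== PORT B =====
def excute_alt (x : Int) : Int :=
  if h : x ≤ 0 then 0
  else
    let d := PySem.Int.mod x 9
    let d := if d = 8 then 5 else d
    d + 8 * excute_alt (PySem.Int.floordiv x 9)
termination_by x.toNat
decreasing_by
  rw [PySem.Int.floordiv_eq_ediv_of_pos (by norm_num : (0:Int) < 9)]
  omega

-- ===== PRECONDITION & SPEC =====
def Spec_excute (x : Int) (out : Int) : Prop := out = excute_alt x
instance (x : Int) (out : Int) : Decidable (Spec_excute x out) := by unfold Spec_excute; infer_instance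

-- ===== CLAIM (what is proved, stated in full; the proofs are below) =====
def Claim_equal_excute : Prop := ∀ (x : Int), Dom_excute x → Spec_excute x (excute x)

-- ===== LEMMAS AND PROOFS =====
theorem excuteLoop_eq (x res cnt : Int) (hc : 0 ≤ cnt) :
    excuteLoop x res cnt = res + 8 ^ cnt.toNat * excute_alt x := by
  revert hc
  induction x, res, cnt using excuteLoop.induct with
  | case1 x res cnt h tmp tmp2 ih =>
    intro hc
    rw [excuteLoop, excute_alt]
    simp only [dif_pos h, dif_neg (by omega : ¬ x ≤ 0)]
    simp only [tmp2, tmp, dite_eq_ite] at ih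
    rw [ih (by omega)]
    have : (cnt + 1).toNat = cnt.toNat + 1 := by omega
    rw [this]
    ring
  | case2 x res cnt h =>
    intro hc
    rw [excuteLoop, excute_alt]
    simp only [dif_neg h, dif_pos (by omega : x ≤ 0)]
    ring

-- ===== VERDICT (by name: the statement is the Claim_ definition above) =====
theorem excute_spec : Claim_equal_excute := by
  intro x _
  unfold Spec_excute excute
  rw [excuteLoop_eq x 0 0 le_rfl]
  simp
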